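-- pv_equiv track=rewrite | github.com/dohhea/PythonClassExamples | 7장 연습문제 파일/exer7-7-2.py | findout
-- ===== SOURCE A (Python) =====
-- def findout(list):
--     even, odd, zero, positive, negative = 0,0,0,0,0
--     for n in list:
--         if n%2==0:
--             even +=1
--         else:
--             odd +=1
--         if n>0:
--             positive +=1
--         elif n<0:
--             negative +=1
--         else:
--             zero +=1
--     return even, odd, zero, positive, negative
-- ===== SOURCE B (Python) =====
-- def findout(list):
--     even = sum(1 for n in list if n % 2 == 0)
--     odd = sum(1 for n in list if n % 2 != 0)
--     zero = sum(1 for n in list if n == 0)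
--     positive = sum(1 for n in list if n > 0)
--     negative = sum(1 for n in list if n < 0)
--     return even, odd, zero, positive, negative
-- ===== Notes on version B (the rewrite author's own statement) =====
-- stated objective: alternative
-- what changed: Replaces A's single branchy accumulator loop with five independent generator-sum passes, one per count.
import Mathlib
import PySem

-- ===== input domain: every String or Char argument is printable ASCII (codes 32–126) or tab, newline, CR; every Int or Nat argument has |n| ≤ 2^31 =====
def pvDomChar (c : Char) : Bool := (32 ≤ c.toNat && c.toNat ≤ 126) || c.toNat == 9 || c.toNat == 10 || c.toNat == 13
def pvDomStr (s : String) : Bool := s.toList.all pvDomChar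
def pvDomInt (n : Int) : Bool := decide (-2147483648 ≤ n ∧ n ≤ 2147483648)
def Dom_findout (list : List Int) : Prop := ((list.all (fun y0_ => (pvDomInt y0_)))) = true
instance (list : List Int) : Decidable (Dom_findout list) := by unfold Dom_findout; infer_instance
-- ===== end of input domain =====

-- B replaces A's single branchy accumulator loop by five independent filtered-sum passes (objective: alternative decomposition).

-- ===== PORT A =====
-- one pass; state (even, odd, zero, positive, negative), branches in A's order
def findoutStep (s : Int × Int × Int × Int × Int) (n : Int) : Int × Int × Int × Int × Int :=
  match s with
  | (even, odd, zero, positive, negative) =>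
    let (even, odd) := if PySem.Int.mod n 2 = 0 then (even + 1, odd) else (even, odd + 1)
    if n > 0 then (even, odd, zero, positive + 1, negative)
    else if n < 0 then (even, odd, zero, positive, negative + 1)
    else (even, odd, zero + 1, positive, negative)

def findout (list : List Int) : Int × Int × Int × Int × Int :=
  list.foldl findoutStep (0, 0, 0, 0, 0)

-- ===== PORT B =====
-- sum(1 for n in list if p n): a pass per count
def sumOnes (p : Int → Bool) (list : List Int) : Int :=
  ((list.filter p).map (fun _ => (1 : Int))).sum

def findout_alt (list : List Int) : Int × Int × Int × Int × Int :=
  ( sumOnes (fun n => PySem.Int.mod n 2 = 0) list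
  , sumOnes (fun n => PySem.Int.mod n 2 ≠ 0) list
  , sumOnes (fun n => n = 0) list
  , sumOnes (fun n => n > 0) list
  , sumOnes (fun n => n < 0) list )

-- ===== PRECONDITION & SPEC =====
def Spec_findout (list : List Int) (out : Int × Int × Int × Int × Int) : Prop := out = findout_alt list
instance (list : List Int) (out : Int × Int × Int × Int × Int) : Decidable (Spec_findout list out) := by unfold Spec_findout; infer_instance

-- ===== CLAIM (what is proved, stated in full; the proofs are below) =====
def Claim_equal_findout : Prop := ∀ (list : List Int), Dom_findout list → Spec_findout list (findout list)

-- ===== LEMMAS AND PROOFS =====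
theorem sumOnes_cons (p : Int → Bool) (n : Int) (l : List Int) :
    sumOnes p (n :: l) = (if p n then 1 else 0) + sumOnes p l := by
  by_cases h : p n <;> simp [sumOnes, List.filter, h]

theorem findout_foldl (l : List Int) (e o z p ng : Int) :
    l.foldl findoutStep (e, o, z, p, ng) =
      ( e + sumOnes (fun n => PySem.Int.mod n 2 = 0) l
      , o + sumOnes (fun n => PySem.Int.mod n 2 ≠ 0) l
      , z + sumOnes (fun n => n = 0) l
      , p + sumOnes (fun n => n > 0) l
      , ng + sumOnes (fun n => n < 0) l ) := by
  induction l generalizing e o z p ng with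
  | nil => simp [sumOnes]
  | cons n t ih =>
      simp only [List.foldl_cons, findoutStep, sumOnes_cons, ih,
        decide_eq_true_eq, ne_eq, decide_not, Bool.not_eq_eq_eq_not,
        Bool.not_true, decide_eq_false_iff_not]
      split_ifs <;> simp only [Prod.mk.injEq] <;> and_intros <;> omega

-- ===== VERDICT (by name: the statement is the Claim_ definition above) =====
theorem findout_spec : Claim_equal_findout := by
  intro l _
  show findout l = findout_alt l
  simp [findout, findout_alt, findout_foldl]
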